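-- pv_equiv track=rewrite | github.com/programiranje-SKG/naloge-daljse | 01_topovske_bitke/resitev.py | najbolj_napaden
-- ===== SOURCE A (Python) =====
-- def se_napadata(top1, top2):
--     return top1 != top2 and (top1[0] == top2[0] or top1[1] == top2[1])
--
-- def napadeni(top, topovi):
--     nap = []
--     for top2 in topovi:
--         if se_napadata(top, top2):
--             nap.append(top2)
--     return nap
--
-- def napadenost(top, topovi):
--     return len(napadeni(top, topovi))
--
-- def najbolj_napaden(topovi):
--     naj_top = None
--     naj_nap = 0
--     for top in topovi:
--         nap = napadenost(top, topovi)
--         if nap > naj_nap: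
--             naj_nap = nap
--             naj_top = top
--     return naj_top
-- ===== SOURCE B (Python) =====
-- def najbolj_napaden(topovi):
--     rows = {}
--     cols = {}
--     pos = {}
--     for r, c in topovi:
--         rows[r] = rows.get(r, 0) + 1
--         cols[c] = cols.get(c, 0) + 1
--         pos[(r, c)] = pos.get((r, c), 0) + 1
--     naj_top = None
--     naj_nap = 0
--     for t in topovi:
--         nap = rows.get(t[0], 0) + cols.get(t[1], 0) - 2 * pos.get(t, 0)
--         if nap > naj_nap:
--             naj_nap = nap
--             naj_top = t
--     return naj_top
-- ===== Notes on version B (the rewrite author's own statement) =====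
-- stated objective: faster
-- what changed: One pass builds row/column/position count dictionaries, then each rook's attack count is rows[r]+cols[c]-2*pos[(r,c)] instead of scanning the whole list per rook.
import Mathlib
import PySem

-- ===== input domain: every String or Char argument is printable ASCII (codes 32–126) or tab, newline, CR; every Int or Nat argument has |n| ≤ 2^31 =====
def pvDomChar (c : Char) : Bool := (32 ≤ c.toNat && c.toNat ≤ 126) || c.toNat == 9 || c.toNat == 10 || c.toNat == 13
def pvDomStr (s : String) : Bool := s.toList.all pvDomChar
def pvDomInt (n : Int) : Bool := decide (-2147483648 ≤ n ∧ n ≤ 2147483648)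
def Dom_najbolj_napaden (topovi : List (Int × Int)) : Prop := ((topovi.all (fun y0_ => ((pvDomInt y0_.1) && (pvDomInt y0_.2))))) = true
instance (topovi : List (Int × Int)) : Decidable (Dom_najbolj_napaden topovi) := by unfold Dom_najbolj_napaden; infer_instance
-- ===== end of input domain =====

-- B replaces A's per-rook rescan of the whole list by one pass building row/column/position
-- count dictionaries (objective: faster, O(n) vs O(n^2)).


-- ===== PORT A =====
def se_napadata (top1 top2 : Int × Int) : Bool :=
  top1 != top2 && (top1.1 == top2.1 || top1.2 == top2.2)

def napadeni (top : Int × Int) (topovi : List (Int × Int)) : List (Int × Int) :=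
  topovi.foldl (fun nap top2 => if se_napadata top top2 then nap ++ [top2] else nap) []

def napadenost (top : Int × Int) (topovi : List (Int × Int)) : Int :=
  ((napadeni top topovi).length : Int)

def najbolj_napaden (topovi : List (Int × Int)) : Option (Int × Int) :=
  (topovi.foldl
    (fun (st : Option (Int × Int) × Int) top =>
      let nap := napadenost top topovi
      if nap > st.2 then (some top, nap) else st)
    (none, 0)).1

-- ===== PORT B =====
def najbolj_napaden_alt (topovi : List (Int × Int)) : Option (Int × Int) :=
  let dicts := topovi.foldl
    (fun (s : PySem.Dict Int Int × PySem.Dict Int Int × PySem.Dict (Int × Int) Int) rc =>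
      (s.1.insert rc.1 (s.1.getD rc.1 0 + 1),
       s.2.1.insert rc.2 (s.2.1.getD rc.2 0 + 1),
       s.2.2.insert rc (s.2.2.getD rc 0 + 1)))
    (PySem.Dict.empty, PySem.Dict.empty, PySem.Dict.empty)
  (topovi.foldl
    (fun (st : Option (Int × Int) × Int) t =>
      let nap := dicts.1.getD t.1 0 + dicts.2.1.getD t.2 0 - 2 * dicts.2.2.getD t 0
      if nap > st.2 then (some t, nap) else st)
    (none, 0)).1

-- ===== PRECONDITION & SPEC =====
def Spec_najbolj_napaden (topovi : List (Int × Int)) (out : Option (Int × Int)) : Prop := out = najbolj_napaden_alt topovi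
instance (topovi : List (Int × Int)) (out : Option (Int × Int)) : Decidable (Spec_najbolj_napaden topovi out) := by unfold Spec_najbolj_napaden; infer_instance

-- ===== CLAIM (what is proved, stated in full; the proofs are below) =====
def Claim_equal_najbolj_napaden : Prop := ∀ (topovi : List (Int × Int)), Dom_najbolj_napaden topovi → Spec_najbolj_napaden topovi (najbolj_napaden topovi)

-- ===== LEMMAS AND PROOFS =====

-- napadeni is a filter
theorem napadeni_eq_filter (top : Int × Int) (topovi : List (Int × Int)) :
    napadeni top topovi = topovi.filter (se_napadata top) := by
  unfold napadeni
  rw [PySem.List.foldl_append_if]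
  simp

-- the counting identity: attackers of t = (#same row) + (#same col) - 2*(#equal)
theorem napadenost_eq_counts (t : Int × Int) (xs : List (Int × Int)) :
    napadenost t xs =
      ((xs.map Prod.fst).count t.1 : Int) + ((xs.map Prod.snd).count t.2 : Int)
        - 2 * (xs.count t : Int) := by
  unfold napadenost
  rw [napadeni_eq_filter]
  induction xs with
  | nil => simp
  | cons h ts ih =>
    by_cases he : t = h
    · subst he
      have hs : se_napadata t t = false := by simp [se_napadata]
      simp only [List.filter_cons, List.map_cons, List.count_cons, hs, if_neg Bool.false_ne_true,
        beq_self_eq_true, if_pos, ih]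
      push_cast
      omega
    · have he' : ¬ h = t := Ne.symm he
      have hs : se_napadata t h = ((t.1 == h.1) || (t.2 == h.2)) := by
        simp [se_napadata, bne_iff_ne, he]
      have b3 : (t == h) = false := by simp [he]
      have b3' : (h == t) = false := by simp [he']
      by_cases hr : t.1 = h.1 <;> by_cases hc : t.2 = h.2
      · exact absurd (Prod.ext hr hc) he
      · have b1 : (t.1 == h.1) = true := by simp [hr]
        have b2 : (t.2 == h.2) = false := by simp [hc]
        have b1' : (h.1 == t.1) = true := by rw [BEq.comm]; exact b1
        have b2' : (h.2 == t.2) = false := by rw [BEq.comm]; exact b2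
        simp only [List.filter_cons, List.map_cons, List.count_cons, hs, b1, b2, b3, b1', b2', b3',
          Bool.true_or, if_true, if_false, ite_true, ite_false, List.length_cons]
        push_cast
        omega
      · have b1 : (t.1 == h.1) = false := by simp [hr]
        have b2 : (t.2 == h.2) = true := by simp [hc]
        have b1' : (h.1 == t.1) = false := by rw [BEq.comm]; exact b1
        have b2' : (h.2 == t.2) = true := by rw [BEq.comm]; exact b2
        simp only [List.filter_cons, List.map_cons, List.count_cons, hs, b1, b2, b3, b1', b2', b3',
          Bool.false_or, if_true, if_false, ite_true, ite_false, List.length_cons]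
        push_cast
        omega
      · have b1 : (t.1 == h.1) = false := by simp [hr]
        have b2 : (t.2 == h.2) = false := by simp [hc]
        have b1' : (h.1 == t.1) = false := by rw [BEq.comm]; exact b1
        have b2' : (h.2 == t.2) = false := by rw [BEq.comm]; exact b2
        simp only [List.filter_cons, List.map_cons, List.count_cons, hs, b1, b2, b3, b1', b2', b3',
          Bool.or_self, if_true, if_false, ite_true, ite_false, List.length_cons]
        push_cast
        omega

-- the triple-dict fold splits into three independent counter folds
theorem dicts_split (xs : List (Int × Int))
    (d1 : PySem.Dict Int Int) (d2 : PySem.Dict Int Int) (d3 : PySem.Dict (Int × Int) Int) :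
    xs.foldl
      (fun (s : PySem.Dict Int Int × PySem.Dict Int Int × PySem.Dict (Int × Int) Int) rc =>
        (s.1.insert rc.1 (s.1.getD rc.1 0 + 1),
         s.2.1.insert rc.2 (s.2.1.getD rc.2 0 + 1),
         s.2.2.insert rc (s.2.2.getD rc 0 + 1)))
      (d1, d2, d3)
    = (xs.foldl (fun d rc => d.insert rc.1 (d.getD rc.1 0 + 1)) d1,
       xs.foldl (fun d rc => d.insert rc.2 (d.getD rc.2 0 + 1)) d2,
       xs.foldl (fun d rc => d.insert rc (d.getD rc 0 + 1)) d3) := by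
  induction xs generalizing d1 d2 d3 with
  | nil => rfl
  | cons h ts ih => simp [List.foldl_cons, ih]

-- B's per-rook score equals A's napadenost
theorem score_eq (xs : List (Int × Int)) (t : Int × Int) :
    ((xs.foldl (fun d rc => d.insert rc.1 (d.getD rc.1 0 + 1)) PySem.Dict.empty).getD t.1 0
      + (xs.foldl (fun d rc => d.insert rc.2 (d.getD rc.2 0 + 1)) PySem.Dict.empty).getD t.2 0
      - 2 * (xs.foldl (fun d rc => d.insert rc (d.getD rc 0 + 1)) PySem.Dict.empty).getD t 0)
    = napadenost t xs := by
  have h1 : (xs.foldl (fun d rc => d.insert rc.1 (d.getD rc.1 0 + 1)) PySem.Dict.empty).getD t.1 0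
      = ((xs.map Prod.fst).count t.1 : Int) := by
    rw [← List.foldl_map (f := Prod.fst)
      (g := fun (d : PySem.Dict Int Int) (x : Int) => d.insert x (d.getD x 0 + 1))]
    rw [PySem.Dict.getD_foldl_insert_add_one]
    simp
  have h2 : (xs.foldl (fun d rc => d.insert rc.2 (d.getD rc.2 0 + 1)) PySem.Dict.empty).getD t.2 0
      = ((xs.map Prod.snd).count t.2 : Int) := by
    rw [← List.foldl_map (f := Prod.snd)
      (g := fun (d : PySem.Dict Int Int) (x : Int) => d.insert x (d.getD x 0 + 1))]
    rw [PySem.Dict.getD_foldl_insert_add_one]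
    simp
  have h3 : (xs.foldl (fun d rc => d.insert rc (d.getD rc 0 + 1)) PySem.Dict.empty).getD t 0
      = (xs.count t : Int) := by
    rw [PySem.Dict.getD_foldl_insert_add_one]; simp
  rw [h1, h2, h3, napadenost_eq_counts]

-- two selection folds with pointwise-equal scores coincide
theorem select_congr (score1 score2 : (Int × Int) → Int)
    (h : ∀ t, score1 t = score2 t) (ts : List (Int × Int))
    (st : Option (Int × Int) × Int) :
    ts.foldl (fun st t => if score1 t > st.2 then (some t, score1 t) else st) st
      = ts.foldl (fun st t => if score2 t > st.2 then (some t, score2 t) else st) st := by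
  simp only [h]

-- ===== VERDICT (by name: the statement is the Claim_ definition above) =====
theorem najbolj_napaden_spec : Claim_equal_najbolj_napaden := by
  intro topovi _
  unfold Spec_najbolj_napaden najbolj_napaden najbolj_napaden_alt
  rw [dicts_split]
  exact congrArg Prod.fst
    (select_congr _ _ (fun t => (score_eq topovi t).symm) topovi (none, 0))
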